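-- pv_equiv track=rewrite | github.com/lyj0913/CS61A | Projects/typing_test/typing_test.py | q3_helper
-- ===== SOURCE A (Python) =====
-- def q3_helper(word):
--     vowels = ["a", "e", "i", "o", "u"]
--     selected = []
--     if word[0] not in vowels:
--         for w in word:
--             if w not in vowels:
--                 selected.append(w)
--             else:
--                 break
--         selected = "".join(selected)
--         word = word[len(selected):]
--         word = word + selected + "ay"
--         return word
--     else:
--         return word + "way"
-- ===== SOURCE B (Python) =====
-- def q3_helper(word):
--     if word[0] in "aeiou":
--         return word + "way"
--     fuel = len(word)
--     while fuel and word[0] not in "aeiou":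
--         word = word[1:] + word[0]
--         fuel -= 1
--     return word + "ay"
-- ===== Notes on version B (the rewrite author's own statement) =====
-- stated objective: alternative
-- what changed: B repeatedly rotates the first character to the end of the word (a loop with a fuel bound of len(word), so an all-consonant word comes back around to its original order) instead of accumulating the leading consonant prefix in a list, joining it and slicing it off.
import Mathlib
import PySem

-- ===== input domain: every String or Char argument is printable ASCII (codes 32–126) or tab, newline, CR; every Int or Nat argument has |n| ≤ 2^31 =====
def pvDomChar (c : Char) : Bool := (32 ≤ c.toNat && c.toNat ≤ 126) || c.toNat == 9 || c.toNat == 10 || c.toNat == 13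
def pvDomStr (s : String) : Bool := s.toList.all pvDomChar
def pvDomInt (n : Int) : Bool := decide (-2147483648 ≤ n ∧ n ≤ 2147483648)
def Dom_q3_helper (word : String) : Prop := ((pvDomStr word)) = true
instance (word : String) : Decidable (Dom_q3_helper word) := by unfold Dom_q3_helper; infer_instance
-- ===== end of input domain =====

-- B rotates the first character to the end until a vowel leads (fuel-bounded recursion)
-- instead of accumulating the consonant prefix and slicing (objective: alternative).

-- ===== PORT A =====
-- Python 1-char strings (word[0], the loop variable w, the vowel list entries) are modelled as Char.
def pvVowelsA : List Char := ['a', 'e', 'i', 'o', 'u']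

-- the for-loop with append/break: collects chars while not a vowel, stops at the first vowel
def pvSelA : List Char → List Char
  | [] => []
  | c :: cs => if pvVowelsA.contains c = false then c :: pvSelA cs else []

def q3_helper (word : String) : String :=
  match PySem.Str.pyGet? word 0 with
  | none => ""  -- word[0] raises IndexError; excluded by Pre_q3_helper
  | some c0 =>
    if pvVowelsA.contains c0 = false then
      let selected := pvSelA word.toList
      -- word = word[len(selected):]
      let rest := PySem.List.slice word.toList (some (selected.length : Int)) none
      -- word + selected + "ay"
      String.ofList (rest ++ selected ++ ['a', 'y'])
    else
      String.ofList (word.toList ++ ['w', 'a', 'y'])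

-- ===== PORT B =====
-- while fuel and word[0] not in "aeiou": word = word[1:] + word[0]; fuel -= 1
-- (the loop as structural recursion on fuel)
def pvRotate : List Char → Nat → List Char
  | w, 0 => w
  | w, fuel + 1 =>
    match w with
    | [] => []  -- w[0] unreachable here: rotation preserves the (nonempty) length
    | c :: cs => if ("aeiou".toList).contains c then c :: cs else pvRotate (cs ++ [c]) fuel

def q3_helper_alt (word : String) : String :=
  match PySem.Str.pyGet? word 0 with
  | none => ""  -- word[0] raises IndexError; excluded by Pre_q3_helper
  | some c0 =>
    if ("aeiou".toList).contains c0 then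
      String.ofList (word.toList ++ ['w', 'a', 'y'])
    else
      -- the rotation loop starting at fuel = len(word), then + "ay"
      String.ofList (pvRotate word.toList word.toList.length ++ ['a', 'y'])

-- ===== PRECONDITION & SPEC =====
-- Pre_ excludes the empty string, on which A (and B) raise IndexError at word[0].
def Pre_q3_helper (word : String) : Prop := word.toList ≠ []
instance (word : String) : Decidable (Pre_q3_helper word) := by unfold Pre_q3_helper; infer_instance
def pvWitness_q3_helper : String := "hello"

def Spec_q3_helper (word : String) (out : String) : Prop := out = q3_helper_alt word
instance (word : String) (out : String) : Decidable (Spec_q3_helper word out) := by unfold Spec_q3_helper; infer_instance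

-- ===== CLAIM (what is proved, stated in full; the proofs are below) =====
def Claim_equal_q3_helper : Prop := ∀ (word : String), Dom_q3_helper word → Pre_q3_helper word → Spec_q3_helper word (q3_helper word)

-- ===== LEMMAS AND PROOFS =====

-- proof-side helper: index of the first lowercase vowel (length if none)
def pvIdx : List Char → Nat
  | [] => 0
  | c :: cs => if ("aeiou".toList).contains c then 0 else pvIdx cs + 1

theorem pvIdx_le_length (cs : List Char) : pvIdx cs ≤ cs.length := by
  induction cs with
  | nil => simp [pvIdx]
  | cons c cs ih => simp [pvIdx]; split <;> omega

theorem pvSelA_eq_take (cs : List Char) : pvSelA cs = cs.take (pvIdx cs) := by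
  induction cs with
  | nil => rfl
  | cons c cs ih =>
    have hv : pvVowelsA.contains c = ("aeiou".toList).contains c := rfl
    show (if pvVowelsA.contains c = false then c :: pvSelA cs else []) =
      List.take (if ("aeiou".toList).contains c = true then 0 else pvIdx cs + 1) (c :: cs)
    cases hc : ("aeiou".toList).contains c
    · rw [hv, hc, if_pos rfl, if_neg (by decide), List.take_succ_cons, ih]
    · rw [hv, hc, if_neg (by decide), if_pos rfl, List.take_zero]

theorem pvSelA_length (cs : List Char) : (pvSelA cs).length = pvIdx cs := by
  rw [pvSelA_eq_take, List.length_take]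
  exact Nat.min_eq_left (pvIdx_le_length cs)

-- the rotation loop, run for exactly cs.length steps with trailing acc, ends with the
-- part from the first vowel on, then acc, then the rotated-out consonant prefix
theorem pvRotate_eq (cs : List Char) : ∀ acc : List Char,
    pvRotate (cs ++ acc) cs.length = cs.drop (pvIdx cs) ++ acc ++ cs.take (pvIdx cs) := by
  induction cs with
  | nil => intro acc; simp [pvRotate, pvIdx]
  | cons c cs ih =>
    intro acc
    show pvRotate (c :: (cs ++ acc)) (cs.length + 1) = _
    rw [pvRotate]
    cases hc : ("aeiou".toList).contains c
    · rw [if_neg (by simp [hc])]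
      have : (cs ++ acc) ++ [c] = cs ++ (acc ++ [c]) := List.append_assoc ..
      rw [this, ih (acc ++ [c])]
      have hidx : pvIdx (c :: cs) = pvIdx cs + 1 := by rw [pvIdx, hc]; rfl
      rw [hidx]; simp
    · rw [if_pos rfl]
      have hidx : pvIdx (c :: cs) = 0 := by rw [pvIdx, hc]; rfl
      rw [hidx]; simp

-- ===== VERDICT (by name: the statement is the Claim_ definition above) =====
theorem q3_helper_spec : Claim_equal_q3_helper := by
  intro word _ hpre
  unfold Spec_q3_helper q3_helper q3_helper_alt
  cases h0 : PySem.Str.pyGet? word 0 with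
  | none =>
    refine absurd h0 ?_
    cases hl : word.toList with
    | nil => exact absurd hl hpre
    | cons c cs => simp [PySem.Str.pyGet?, PySem.Chars.pyGet?, hl]
  | some c0 =>
    have hv : pvVowelsA.contains c0 = ("aeiou".toList).contains c0 := rfl
    dsimp only
    cases hc : ("aeiou".toList).contains c0
    · rw [hv, hc, if_pos rfl, if_neg (by decide)]
      have hrot := pvRotate_eq word.toList []
      rw [List.append_nil] at hrot
      rw [hrot, pvSelA_length, pvSelA_eq_take, PySem.List.slice_from_natCast]
      simp
    · rw [hv, hc, if_neg (by decide), if_pos rfl]
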